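-- pv_equiv track=rewrite | github.com/purple-phoenix/dailyprogrammer | python/375-card-flipping/card_flipper.py | flip_card_helper
-- ===== SOURCE A (Python) =====
-- from typing import Dict, List, Union, Optional, Tuple
--
-- Card = bool
--
-- Game = List[Optional[Card]]
--
-- def is_face_up(card: Card) -> bool:
--     return card
--
-- def can_flip(card: Card) -> bool:
--     return is_face_up(card)
--
-- def flip_card_helper(game: Game, index: int, new_index: int):
--     if not game:
--         return []
--     else:
--         card = game[0]
--         if index == new_index and can_flip(card):
--             return [None] + flip_card_helper(game[1:], index, new_index + 1)
--         else:
--             return [card] + flip_card_helper(game[1:], index, new_index + 1)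
-- ===== SOURCE B (Python) =====
-- def flip_card_helper(game, index, new_index):
--     result = list(game)
--     pos = index - new_index
--     if 0 <= pos < len(result) and result[pos]:
--         result[pos] = None
--     return result
-- ===== Notes on version B (the rewrite author's own statement) =====
-- stated objective: faster
-- what changed: Replaced the O(n^2) recursion (which re-slices the list at every step) by a single shallow copy plus one O(1) flip at offset index-new_index.
import Mathlib
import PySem

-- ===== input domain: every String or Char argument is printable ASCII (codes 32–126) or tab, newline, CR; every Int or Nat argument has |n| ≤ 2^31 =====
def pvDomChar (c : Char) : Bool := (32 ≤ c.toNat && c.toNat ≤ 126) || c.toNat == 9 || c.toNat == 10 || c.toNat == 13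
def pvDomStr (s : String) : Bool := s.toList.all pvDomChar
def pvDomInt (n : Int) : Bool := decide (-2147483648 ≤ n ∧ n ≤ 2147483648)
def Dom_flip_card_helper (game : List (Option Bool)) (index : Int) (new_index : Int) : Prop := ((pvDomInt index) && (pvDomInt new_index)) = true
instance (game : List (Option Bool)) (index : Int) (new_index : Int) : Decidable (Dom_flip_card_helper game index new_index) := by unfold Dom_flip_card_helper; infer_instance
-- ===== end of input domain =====

-- B replaces A's O(n^2) copying recursion by one shallow copy and a single O(1) flip at offset index - new_index.


-- ===== PORT A =====
-- card truthiness: an Optional[bool] card is truthy exactly when it is `some true`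
def pv_is_face_up (card : Option Bool) : Bool := card == some true
def pv_can_flip (card : Option Bool) : Bool := pv_is_face_up card

def flip_card_helper (game : List (Option Bool)) (index : Int) (new_index : Int) : List (Option Bool) :=
  match game with
  | [] => []
  | card :: rest =>
    if index == new_index && pv_can_flip card then
      none :: flip_card_helper rest index (new_index + 1)
    else
      card :: flip_card_helper rest index (new_index + 1)

-- ===== PORT B =====
def flip_card_helper_alt (game : List (Option Bool)) (index : Int) (new_index : Int) : List (Option Bool) :=
  let pos := index - new_index
  if 0 ≤ pos ∧ pos < (game.length : Int) ∧ game.getD pos.toNat none = some true then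
    game.set pos.toNat none
  else
    game

-- ===== PRECONDITION & SPEC =====
def Spec_flip_card_helper (game : List (Option Bool)) (index : Int) (new_index : Int) (out : List (Option Bool)) : Prop := out = flip_card_helper_alt game index new_index
instance (game : List (Option Bool)) (index : Int) (new_index : Int) (out : List (Option Bool)) : Decidable (Spec_flip_card_helper game index new_index out) := by unfold Spec_flip_card_helper; infer_instance

-- ===== CLAIM (what is proved, stated in full; the proofs are below) =====
def Claim_equal_flip_card_helper : Prop := ∀ (game : List (Option Bool)) (index : Int) (new_index : Int), Dom_flip_card_helper game index new_index → Spec_flip_card_helper game index new_index (flip_card_helper game index new_index)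

-- ===== LEMMAS AND PROOFS =====
theorem flip_eq_alt (game : List (Option Bool)) (index new_index : Int) :
    flip_card_helper game index new_index = flip_card_helper_alt game index new_index := by
  induction game generalizing new_index with
  | nil => simp [flip_card_helper, flip_card_helper_alt]
  | cons card rest ih =>
    simp only [flip_card_helper, flip_card_helper_alt]
    by_cases h : index = new_index
    · subst h
      simp only [sub_self]
      by_cases hc : card = some true
      · subst hc
        simp only [pv_can_flip, pv_is_face_up, beq_self_eq_true, Bool.and_self, if_true,
          ih (index + 1)]
        have hneg : index - (index + 1) = -1 := by ring
        simp [flip_card_helper_alt, hneg]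
      · have : pv_can_flip card = false := by
          simp [pv_can_flip, pv_is_face_up]; exact fun h => absurd h hc
        simp only [this, Bool.and_false, if_false, ih (index + 1)]
        have hneg : index - (index + 1) = -1 := by ring
        have hc' : ¬ card = some true := hc
        simp [flip_card_helper_alt, hneg, Int.toNat_zero, hc']
    · have hne : (index == new_index) = false := by simp [h]
      simp only [hne, Bool.false_and, if_false, ih (new_index + 1)]
      have hsub : index - (new_index + 1) = (index - new_index) - 1 := by ring
      set p := index - new_index with hp
      have hp0 : p ≠ 0 := by omega
      by_cases hpos : 0 < p
      · -- p ≥ 1 : both sides look at rest at offset p-1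
        have ht : p.toNat = (p - 1).toNat + 1 := by omega
        simp only [flip_card_helper_alt, hsub, Bool.false_eq_true, if_false]
        by_cases hcond : 0 ≤ p - 1 ∧ p - 1 < (rest.length : Int) ∧ rest.getD (p - 1).toNat none = some true
        · have hcond' : 0 ≤ p ∧ p < ((card :: rest).length : Int) ∧ (card :: rest).getD p.toNat none = some true := by
            refine ⟨by omega, by simp; omega, ?_⟩
            rw [ht]; simpa using hcond.2.2
          rw [if_pos hcond, if_pos hcond', ht, List.set_cons_succ]
        · have hcond' : ¬ (0 ≤ p ∧ p < ((card :: rest).length : Int) ∧ (card :: rest).getD p.toNat none = some true) := by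
            intro ⟨h1, h2, h3⟩
            apply hcond
            refine ⟨by omega, by simp at h2; omega, ?_⟩
            rw [ht] at h3; simpa using h3
          rw [if_neg hcond, if_neg hcond']
      · -- p < 0 : both conditions fail, nothing is flipped
        have h1 : ¬ (0 ≤ p - 1) := by omega
        have h2 : ¬ (0 ≤ p) := by omega
        simp only [flip_card_helper_alt, hsub, Bool.false_eq_true, if_false]
        rw [if_neg (fun hh => h1 hh.1), if_neg (fun hh => h2 hh.1)]

-- ===== VERDICT (by name: the statement is the Claim_ definition above) =====
theorem flip_card_helper_spec : Claim_equal_flip_card_helper := by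
  intro game index new_index _
  exact flip_eq_alt game index new_index
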